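-- pv_equiv track=rewrite | github.com/thewilliamharry/rpi-dashboard | dashboard/app.py | _build_uptime_buckets
-- ===== SOURCE A (Python) =====
-- UPTIME_WINDOW_SECONDS = 7 * 86400
--
-- UPTIME_BUCKETS = 168
--
-- def _build_uptime_buckets(checks, now):
--     bucket_seconds = max(1, UPTIME_WINDOW_SECONDS // UPTIME_BUCKETS)
--     buckets = [-1] * UPTIME_BUCKETS
--     for ts, online in checks:
--         age = now - int(ts)
--         if age < 0 or age > UPTIME_WINDOW_SECONDS:
--             continue
--         idx = UPTIME_BUCKETS - 1 - int(age // bucket_seconds)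
--         if 0 <= idx < UPTIME_BUCKETS:
--             if int(online) == 0:
--                 buckets[idx] = 0
--             elif buckets[idx] == -1:
--                 buckets[idx] = 1
--     return buckets
-- ===== SOURCE B (Python) =====
-- UPTIME_WINDOW_SECONDS = 7 * 86400
--
-- UPTIME_BUCKETS = 168
--
-- def _build_uptime_buckets(checks, now):
--     bucket_seconds = max(1, UPTIME_WINDOW_SECONDS // UPTIME_BUCKETS)
--
--     def score(idx):
--         # bucket-major: scan all checks for this bucket, early return on offline
--         val = -1
--         for ts, online in checks:
--             age = now - int(ts)
--             if age < 0 or age > UPTIME_WINDOW_SECONDS: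
--                 continue
--             if UPTIME_BUCKETS - 1 - int(age // bucket_seconds) == idx:
--                 if int(online) == 0:
--                     return 0
--                 val = 1
--         return val
--
--     return [score(i) for i in range(UPTIME_BUCKETS)]
-- ===== Notes on version B (the rewrite author's own statement) =====
-- stated objective: alternative
-- what changed: B is bucket-major: for each of the 168 bucket indices it scans the checks list computing that bucket's score directly (early return on the first offline hit), instead of A's single check-major pass that mutates the result list in place.
import Mathlib
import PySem

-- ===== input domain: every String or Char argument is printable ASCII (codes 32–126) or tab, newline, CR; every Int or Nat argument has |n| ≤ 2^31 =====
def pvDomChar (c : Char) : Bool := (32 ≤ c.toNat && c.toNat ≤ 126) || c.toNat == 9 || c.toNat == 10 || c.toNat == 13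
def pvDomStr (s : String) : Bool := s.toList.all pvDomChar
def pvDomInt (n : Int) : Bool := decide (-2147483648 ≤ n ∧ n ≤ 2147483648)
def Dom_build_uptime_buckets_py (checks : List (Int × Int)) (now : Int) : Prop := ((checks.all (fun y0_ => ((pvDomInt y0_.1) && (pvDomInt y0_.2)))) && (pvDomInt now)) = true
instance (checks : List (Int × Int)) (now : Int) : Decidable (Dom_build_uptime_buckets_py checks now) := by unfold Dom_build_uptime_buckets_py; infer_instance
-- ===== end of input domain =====

-- ===== PORT A =====
-- B is bucket-major (one scan of the checks per bucket index) instead of A's check-major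
-- single pass; a genuinely different traversal order, same result, honest O(168*n) cost.
-- loop body of A (buckets[idx] is only written with 0 ≤ idx < 168, so .toNat is exact)
def pvStepA (now : Int) (buckets : List Int) (c : Int × Int) : List Int :=
  let age := now - c.1
  if age < 0 ∨ age > 7 * 86400 then buckets
  else
    let idx : Int := 168 - 1 - PySem.Int.floordiv age (max 1 (PySem.Int.floordiv (7 * 86400) 168))
    if 0 ≤ idx ∧ idx < 168 then
      if c.2 = 0 then buckets.set idx.toNat 0
      else if buckets.getD idx.toNat 0 = -1 then buckets.set idx.toNat 1
      else buckets
    else buckets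

def build_uptime_buckets_py (checks : List (Int × Int)) (now : Int) : List Int :=
  checks.foldl (pvStepA now) (List.replicate 168 (-1))

-- ===== PORT B =====
-- Source B's inner 'score' helper: scan checks for one bucket, early return 0 on offline
def pvScore (now : Int) (idx : Int) : List (Int × Int) → Int → Int
  | [], val => val
  | c :: cs, val =>
    let age := now - c.1
    if age < 0 ∨ age > 7 * 86400 then pvScore now idx cs val
    else if 168 - 1 - PySem.Int.floordiv age (max 1 (PySem.Int.floordiv (7 * 86400) 168)) = idx then
      (if c.2 = 0 then 0 else pvScore now idx cs 1)
    else pvScore now idx cs val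

def build_uptime_buckets_py_alt (checks : List (Int × Int)) (now : Int) : List Int :=
  (List.range 168).map (fun (i : Nat) => pvScore now (i : Int) checks (-1))

-- ===== PRECONDITION & SPEC =====
def Spec_build_uptime_buckets_py (checks : List (Int × Int)) (now : Int) (out : List Int) : Prop := out = build_uptime_buckets_py_alt checks now
instance (checks : List (Int × Int)) (now : Int) (out : List Int) : Decidable (Spec_build_uptime_buckets_py checks now out) := by unfold Spec_build_uptime_buckets_py; infer_instance

-- ===== CLAIM (what is proved, stated in full; the proofs are below) =====
def Claim_equal_build_uptime_buckets_py : Prop := ∀ (checks : List (Int × Int)) (now : Int), Dom_build_uptime_buckets_py checks now → Spec_build_uptime_buckets_py checks now (build_uptime_buckets_py checks now)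

-- ===== LEMMAS AND PROOFS =====

theorem pvStepA_length (now : Int) (b : List Int) (c : Int × Int) :
    (pvStepA now b c).length = b.length := by
  simp only [pvStepA]
  split_ifs <;> simp

-- how one step of A changes the value at a fixed index i < 168
theorem pvStepA_getD (now : Int) (b : List Int) (c : Int × Int) (i : Nat)
    (hi : i < b.length) (hlen : b.length = 168) :
    (pvStepA now b c)[i]?.getD 0 =
      (if now - c.1 < 0 ∨ now - c.1 > 7 * 86400 then b[i]?.getD 0
       else if 168 - 1 - PySem.Int.floordiv (now - c.1) (max 1 (PySem.Int.floordiv (7 * 86400) 168)) = (i : Int) then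
         (if c.2 = 0 then 0 else if b[i]?.getD 0 = -1 then 1 else b[i]?.getD 0)
       else b[i]?.getD 0) := by
  simp only [pvStepA]
  set I : Int := 168 - 1 - PySem.Int.floordiv (now - c.1) (max 1 (PySem.Int.floordiv (7 * 86400) 168)) with hI
  by_cases h1 : now - c.1 < 0 ∨ now - c.1 > 7 * 86400
  · rw [if_pos h1, if_pos h1]
  · rw [if_neg h1, if_neg h1]
    have hi168 : i < 168 := hlen ▸ hi
    by_cases heq : I = (i : Int)
    · have hr : 0 ≤ I ∧ I < 168 := by omega
      have htn : I.toNat = i := by omega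
      rw [if_pos hr, if_pos heq]
      by_cases hon : c.2 = 0
      · rw [if_pos hon, if_pos hon, htn]
        simp [hi]
      · rw [if_neg hon, if_neg hon, htn, List.getD_eq_getElem?_getD]
        by_cases hm1 : b[i]?.getD 0 = -1
        · rw [if_pos hm1, if_pos hm1]
          simp [hi]
        · rw [if_neg hm1, if_neg hm1]
    · rw [if_neg heq]
      by_cases hr : 0 ≤ I ∧ I < 168
      · have hne : I.toNat ≠ i := by omega
        rw [if_pos hr]
        by_cases hon : c.2 = 0
        · rw [if_pos hon]
          simp [List.getElem?_set_ne hne]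
        · rw [if_neg hon]
          by_cases hm1 : b.getD I.toNat 0 = -1
          · rw [if_pos hm1]
            simp [List.getElem?_set_ne hne]
          · rw [if_neg hm1]
      · rw [if_neg hr]

-- once a bucket holds 0, A never changes it again
theorem pvA_zero_stable (now : Int) (checks : List (Int × Int)) (b : List Int) (i : Nat)
    (hi : i < b.length) (hlen : b.length = 168) (h0 : b[i]?.getD 0 = 0) :
    (checks.foldl (pvStepA now) b)[i]?.getD 0 = 0 := by
  induction checks generalizing b with
  | nil => exact h0
  | cons c cs ih =>
    rw [List.foldl_cons]
    refine ih (pvStepA now b c) ?_ ?_ ?_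
    · rw [pvStepA_length]; exact hi
    · rw [pvStepA_length]; exact hlen
    · rw [pvStepA_getD now b c i hi hlen]
      split_ifs <;> simp_all

-- main invariant: A's fold at index i equals B's per-bucket scan started at the current value
theorem pvA_eq_score (now : Int) (checks : List (Int × Int)) (b : List Int) (i : Nat) (v : Int)
    (hi : i < b.length) (hlen : b.length = 168)
    (hv : v = -1 ∨ v = 1) (hb : b[i]?.getD 0 = v) :
    (checks.foldl (pvStepA now) b)[i]?.getD 0 = pvScore now (i : Int) checks v := by
  induction checks generalizing b v with
  | nil => simpa [pvScore] using hb
  | cons c cs ih =>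
    rw [List.foldl_cons]
    simp only [pvScore]
    set I : Int := 168 - 1 - PySem.Int.floordiv (now - c.1) (max 1 (PySem.Int.floordiv (7 * 86400) 168)) with hI
    have hstep := pvStepA_getD now b c i hi hlen
    rw [← hI] at hstep
    have hi' : i < (pvStepA now b c).length := by rw [pvStepA_length]; exact hi
    have hlen' : (pvStepA now b c).length = 168 := by rw [pvStepA_length]; exact hlen
    by_cases h1 : now - c.1 < 0 ∨ now - c.1 > 7 * 86400
    · rw [if_pos h1] at hstep
      rw [if_pos h1]
      exact ih (pvStepA now b c) v hi' hlen' hv (hstep.trans hb)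
    · rw [if_neg h1] at hstep
      rw [if_neg h1]
      by_cases heq : I = (i : Int)
      · rw [if_pos heq] at hstep
        rw [if_pos heq]
        by_cases hon : c.2 = 0
        · rw [if_pos hon] at hstep
          rw [if_pos hon]
          exact pvA_zero_stable now cs (pvStepA now b c) i hi' hlen' hstep
        · rw [if_neg hon] at hstep
          rw [if_neg hon]
          have hb1 : (pvStepA now b c)[i]?.getD 0 = 1 := by
            rw [hstep]
            rcases hv with h | h <;> simp [hb, h]
          exact ih (pvStepA now b c) 1 hi' hlen' (Or.inr rfl) hb1
      · rw [if_neg heq] at hstep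
        rw [if_neg heq]
        exact ih (pvStepA now b c) v hi' hlen' hv (hstep.trans hb)

-- ===== VERDICT (by name: the statement is the Claim_ definition above) =====
theorem build_uptime_buckets_py_spec : Claim_equal_build_uptime_buckets_py := by
  intro checks now _
  unfold Spec_build_uptime_buckets_py build_uptime_buckets_py build_uptime_buckets_py_alt
  have hlen : (checks.foldl (pvStepA now) (List.replicate 168 (-1))).length = 168 := by
    have : ∀ (cs : List (Int × Int)) (b : List Int),
        (cs.foldl (pvStepA now) b).length = b.length := by
      intro cs
      induction cs with
      | nil => intro b; rfl
      | cons c cs ih => intro b; rw [List.foldl_cons, ih, pvStepA_length]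
    rw [this, List.length_replicate]
  apply List.ext_getElem
  · rw [hlen, List.length_map, List.length_range]
  · intro i hi hi'
    have hi168 : i < 168 := by rw [hlen] at hi; exact hi
    have h := pvA_eq_score now checks (List.replicate 168 (-1)) i (-1)
      (by rw [List.length_replicate]; exact hi168) List.length_replicate (Or.inl rfl)
      (by simp only [List.getElem?_replicate, if_pos hi168, Option.getD_some])
    simp only [List.getElem_map, List.getElem_range]
    have hg : (checks.foldl (pvStepA now) (List.replicate 168 (-1)))[i] =
        (checks.foldl (pvStepA now) (List.replicate 168 (-1)))[i]?.getD 0 := by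
      rw [List.getElem?_eq_getElem hi]; rfl
    rw [hg, h]
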